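-- pv_equiv track=rewrite | github.com/maxnelso/algorithms_competitions | top_coder/SRM 669/CombiningSlimes.py | maxMascots
-- ===== SOURCE A (Python) =====
-- def maxMascots(a):
--   a = list(a)
--   a.sort()
--   total = 0
--   while len(a) != 1:
--     total += a[0] * a[-1]
--     new = a[0] + a[-1]
--     a = a[1:len(a) - 1] + [new]
--   return total
-- ===== SOURCE B (Python) =====
-- def maxMascots(a):
--   s = 0
--   q = 0
--   for x in a:
--     s += x
--     q += x * x
--   return (s * s - q) // 2
-- ===== Notes on version B (the rewrite author's own statement) =====
-- stated objective: faster
-- what changed: Replaces the sort plus repeated merge-and-reslice loop by a single pass computing sum and sum of squares and the closed form (sum^2 - sum_of_squares)//2, which equals the accumulated total for any merge order.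
import Mathlib
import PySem

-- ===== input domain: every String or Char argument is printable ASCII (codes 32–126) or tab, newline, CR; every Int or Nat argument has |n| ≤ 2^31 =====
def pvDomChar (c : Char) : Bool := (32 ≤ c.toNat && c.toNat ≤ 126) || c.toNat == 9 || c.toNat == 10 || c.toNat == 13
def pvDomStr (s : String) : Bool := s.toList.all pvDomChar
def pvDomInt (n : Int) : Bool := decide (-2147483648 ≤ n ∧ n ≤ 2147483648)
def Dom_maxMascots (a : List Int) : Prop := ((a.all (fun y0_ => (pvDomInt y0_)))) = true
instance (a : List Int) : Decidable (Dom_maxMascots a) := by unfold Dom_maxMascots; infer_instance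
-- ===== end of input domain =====

-- B replaces A's sort + quadratic merge loop by a one-pass closed form (sum^2 - sum of squares)/2; asymptotically faster.


-- ===== PORT A =====
-- the 'while len(a) != 1' loop; fuel = initial length (the length drops by 1 each iteration)
def maxMascotsLoop : Nat → List Int → Int → Int
  | 0, _, total => total
  | fuel + 1, a, total =>
    if a.length ≠ 1 then
      let x := PySem.List.pyGetD a 0 0          -- a[0]   (Pre_ keeps the list nonempty, so in range)
      let y := PySem.List.pyGetD a (-1) 0       -- a[-1]
      maxMascotsLoop fuel
        (PySem.List.slice a (some 1) (some ((a.length : Int) - 1)) ++ [x + y])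
        (total + x * y)
    else total

def maxMascots (a : List Int) : Int :=
  let a := PySem.List.sorted a (fun x => x) false
  maxMascotsLoop a.length a 0

-- ===== PORT B =====
def maxMascots_alt (a : List Int) : Int :=
  let sq := a.foldl (fun (p : Int × Int) x => (p.1 + x, p.2 + x * x)) (0, 0)
  PySem.Int.floordiv (sq.1 * sq.1 - sq.2) 2

-- ===== PRECONDITION & SPEC =====
-- Pre_ excludes exactly the empty list, on which A raises IndexError (a[0] in the first loop iteration).
def Pre_maxMascots (a : List Int) : Prop := a ≠ []
instance (a : List Int) : Decidable (Pre_maxMascots a) := by unfold Pre_maxMascots; infer_instance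
def pvWitness_maxMascots : List Int := [3, 1, 2]

def Spec_maxMascots (a : List Int) (out : Int) : Prop := out = maxMascots_alt a
instance (a : List Int) (out : Int) : Decidable (Spec_maxMascots a out) := by unfold Spec_maxMascots; infer_instance

-- ===== CLAIM (what is proved, stated in full; the proofs are below) =====
def Claim_equal_maxMascots : Prop := ∀ (a : List Int), Dom_maxMascots a → Pre_maxMascots a → Spec_maxMascots a (maxMascots a)

-- ===== LEMMAS AND PROOFS =====

-- sum and sum-of-squares of a list
def pvS (a : List Int) : Int := a.sum
def pvQ (a : List Int) : Int := (a.map (fun x => x * x)).sum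

lemma pvS_perm {a b : List Int} (h : a.Perm b) : pvS a = pvS b := h.sum_eq
lemma pvQ_perm {a b : List Int} (h : a.Perm b) : pvQ a = pvQ b := (h.map _).sum_eq

-- loop invariant: twice the accumulated total plus (S^2 - Q) is preserved; the loop ends at a singleton where S^2 - Q = 0
lemma maxMascotsLoop_eq : ∀ (fuel : Nat) (a : List Int) (total : Int),
    a ≠ [] → a.length ≤ fuel →
    2 * maxMascotsLoop fuel a total = 2 * total + (pvS a * pvS a - pvQ a) := by
  intro fuel
  induction fuel with
  | zero => intro a total hne hlen; cases a with
      | nil => exact absurd rfl hne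
      | cons x t => simp at hlen
  | succ n ih =>
    intro a total hne hlen
    by_cases h1 : a.length = 1
    · -- a = [z]
      obtain ⟨z, rfl⟩ : ∃ z, a = [z] := by
        cases a with
        | nil => exact absurd rfl hne
        | cons x t => cases t with
          | nil => exact ⟨x, rfl⟩
          | cons y u => simp at h1
      simp [maxMascotsLoop, pvS, pvQ]
    · -- a has length ≥ 2: a = x :: mid ++ [y]
      have h2 : 2 ≤ a.length := by
        cases a with
        | nil => exact absurd rfl hne
        | cons x t => cases t with
          | nil => simp at h1
          | cons y u => simp
      obtain ⟨x, t, rfl⟩ : ∃ x t, a = x :: t := by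
        cases a with
        | nil => exact absurd rfl hne
        | cons x t => exact ⟨x, t, rfl⟩
      have ht : t ≠ [] := by intro h; subst h; simp at h2
      obtain ⟨mid, y, rfl⟩ : ∃ mid y, t = mid ++ [y] := by
        refine ⟨t.dropLast, t.getLast ht, ?_⟩
        exact (List.dropLast_append_getLast ht).symm
      -- unfold ONE loop step
      have hx : PySem.List.pyGetD (x :: (mid ++ [y])) 0 0 = x := by
        simp [PySem.List.pyGetD_zero_cons]
      have hy : PySem.List.pyGetD (x :: (mid ++ [y])) (-1) 0 = y := by
        have : x :: (mid ++ [y]) = (x :: mid) ++ [y] := by simp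
        rw [this, PySem.List.pyGetD_neg_one_append_singleton]
      have hslice : PySem.List.slice (x :: (mid ++ [y])) (some 1)
          (some (((x :: (mid ++ [y])).length : Int) - 1)) = mid := by
        rw [PySem.List.slice_toNat _ (by norm_num) (by simp; omega)]
        simp
      rw [maxMascotsLoop, if_pos h1, hx, hy, hslice]
      have hrec := ih (mid ++ [x + y]) (total + x * y) (by simp)
        (by simp at hlen ⊢; omega)
      rw [hrec]
      have hS : pvS (mid ++ [x + y]) = pvS (x :: (mid ++ [y])) := by
        simp [pvS]; ring
      have hQ : pvQ (mid ++ [x + y]) =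
          pvQ (x :: (mid ++ [y])) + 2 * (x * y) := by
        simp [pvQ]; ring
      rw [hS, hQ]; ring

-- B's fold computes (sum, sum of squares)
lemma foldl_sq (a : List Int) (p : Int × Int) :
    a.foldl (fun (p : Int × Int) x => (p.1 + x, p.2 + x * x)) p
      = (p.1 + pvS a, p.2 + pvQ a) := by
  induction a generalizing p with
  | nil => simp [pvS, pvQ]
  | cons x t ih => simp [List.foldl_cons, ih, pvS, pvQ]; constructor <;> ring

lemma alt_eq (a : List Int) :
    maxMascots_alt a = PySem.Int.floordiv (pvS a * pvS a - pvQ a) 2 := by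
  simp [maxMascots_alt, foldl_sq]

-- ===== VERDICT (by name: the statement is the Claim_ definition above) =====
theorem maxMascots_spec : Claim_equal_maxMascots := by
  intro a _ hpre
  unfold Spec_maxMascots
  have hperm : (PySem.List.sorted a (fun x => x) false).Perm a :=
    PySem.List.sorted_perm a (fun x => x) false
  have hne : PySem.List.sorted a (fun x => x) false ≠ [] := by
    intro h
    exact hpre ((PySem.List.sorted_eq_nil_iff a (fun x => x) false).mp h)
  have hloop := maxMascotsLoop_eq (PySem.List.sorted a (fun x => x) false).length
    (PySem.List.sorted a (fun x => x) false) 0 hne le_rfl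
  have hA : 2 * maxMascots a = pvS a * pvS a - pvQ a := by
    unfold maxMascots
    rw [hloop, pvS_perm hperm, pvQ_perm hperm]; ring
  rw [alt_eq]
  have : pvS a * pvS a - pvQ a = 2 * maxMascots a := hA.symm
  rw [this]
  show maxMascots a = PySem.Int.floordiv (2 * maxMascots a) 2
  simp [PySem.Int.floordiv]
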